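-- pv_equiv track=rewrite | github.com/rishivardhanmm/datasage | main_logic.py | expand_schema_matches
-- ===== SOURCE A (Python) =====
-- def build_table_description(table, columns):
--     col_desc = ", ".join(f"{column} ({dtype})" for column, dtype in columns)
--     return f"Table {table} has columns: {col_desc}"
--
-- def expand_schema_matches(lines, schema):
--     expanded = []
--     seen = set()
--
--     def add_line(line):
--         if line and line not in seen:
--             seen.add(line)
--             expanded.append(line)
--
--     for line in lines:
--         mentioned_tables = [
--             table
--             for table in schema
--             if line.startswith(f"Table {table} ")
--             or f"{table}." in line
--             or f" {table} " in line
--         ]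
--         for table in mentioned_tables:
--             add_line(build_table_description(table, schema[table]))
--         add_line(line)
--
--     return expanded
-- ===== SOURCE B (Python) =====
-- def expand_schema_matches(lines, schema):
--     # Transposed matching: one sweep over the lines PER TABLE, collecting each
--     # line's matched schema descriptions into a per-line bucket; then a single
--     # emit pass over (bucket, line) pairs that drops empties and duplicates.
--     buckets = [[] for _ in lines]
--     for table, columns in schema.items():
--         desc = "Table {} has columns: {}".format(
--             table, ", ".join("{} ({})".format(c, d) for c, d in columns))
--         p_start = "Table " + table + " "
--         p_dot = table + "."
--         p_word = " " + table + " "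
--         for bucket, line in zip(buckets, lines):
--             if line.startswith(p_start) or p_dot in line or p_word in line:
--                 bucket.append(desc)
--     seen = set()
--     out = []
--     for bucket, line in zip(buckets, lines):
--         for s in bucket + [line]:
--             if s and s not in seen:
--                 seen.add(s)
--                 out.append(s)
--     return out
-- ===== Notes on version B (the rewrite author's own statement) =====
-- stated objective: alternative
-- what changed: B inverts the loop nesting: instead of A's per-line scan over all tables that rebuilds every pattern and description string at each mention, B makes one sweep over the lines per table with that table's patterns and description built once, accumulating matches in per-line buckets, then emits buckets+lines in a single final dedup pass.
import Mathlib
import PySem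

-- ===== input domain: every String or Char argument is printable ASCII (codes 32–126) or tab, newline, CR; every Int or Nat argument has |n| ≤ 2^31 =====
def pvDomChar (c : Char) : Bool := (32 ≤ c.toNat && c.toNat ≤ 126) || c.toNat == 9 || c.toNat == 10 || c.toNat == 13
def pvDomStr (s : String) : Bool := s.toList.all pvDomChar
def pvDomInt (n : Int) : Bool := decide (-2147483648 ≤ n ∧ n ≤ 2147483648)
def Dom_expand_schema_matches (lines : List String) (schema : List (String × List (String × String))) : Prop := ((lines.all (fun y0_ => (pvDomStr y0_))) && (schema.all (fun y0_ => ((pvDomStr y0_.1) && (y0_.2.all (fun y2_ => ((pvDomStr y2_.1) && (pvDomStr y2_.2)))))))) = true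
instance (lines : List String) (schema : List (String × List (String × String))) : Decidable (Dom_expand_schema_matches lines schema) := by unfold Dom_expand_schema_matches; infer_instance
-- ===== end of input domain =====

-- B inverts the loop nesting: one sweep over the lines per table (patterns and description
-- built once), matches collected in per-line buckets, then one emit/dedup pass (objective: alternative).

-- ===== PORT A =====
-- build_table_description(table, columns)
def pvDesc (table : String) (columns : List (String × String)) : String :=
  "Table " ++ table ++ " has columns: " ++
    PySem.Str.join ", " (columns.map (fun p => p.1 ++ " (" ++ p.2 ++ ")"))

-- A's add_line closure: state = (expanded, seen)
def pvAddLine (st : List String × PySem.Set String) (line : String) :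
    List String × PySem.Set String :=
  if line ≠ "" ∧ ¬ line ∈ st.2 then (st.1 ++ [line], PySem.Set.add st.2 line) else st

def expand_schema_matches (lines : List String) (schema : List (String × List (String × String))) : List String :=
  let d := PySem.Dict.ofList schema
  let final :=
    lines.foldl (fun st line =>
      let mentioned := d.keys.filter (fun table =>
        PySem.Str.startswith line ("Table " ++ table ++ " ")
        || PySem.Str.isIn (table ++ ".") line
        || PySem.Str.isIn (" " ++ table ++ " ") line)
      let st := mentioned.foldl (fun st table => pvAddLine st (pvDesc table (d.getD table []))) st
      pvAddLine st line) ([], PySem.Set.empty)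
  final.1

-- ===== PORT B =====
-- Source B's match test with the precomputed patterns of one table
def pvMatchB (line p_start p_dot p_word : String) : Bool :=
  PySem.Str.startswith line p_start || PySem.Str.isIn p_dot line || PySem.Str.isIn p_word line

def expand_schema_matches_alt (lines : List String) (schema : List (String × List (String × String))) : List String :=
  -- buckets = [[] for _ in lines]; one sweep over the lines per table
  let buckets := (PySem.Dict.ofList schema).items.foldl (fun buckets p =>
      let desc := pvDesc p.1 p.2
      let p_start := "Table " ++ p.1 ++ " "
      let p_dot := p.1 ++ "."
      let p_word := " " ++ p.1 ++ " "
      List.zipWith (fun bucket line =>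
        if pvMatchB line p_start p_dot p_word then bucket ++ [desc] else bucket) buckets lines)
    (lines.map (fun _ => ([] : List String)))
  -- final emit pass over zip(buckets, lines), dropping empties and duplicates
  let final := (buckets.zip lines).foldl (fun st q =>
      (q.1 ++ [q.2]).foldl (fun st s =>
        if s ≠ "" ∧ ¬ s ∈ st.2 then (st.1 ++ [s], PySem.Set.add st.2 s) else st) st)
    ([], PySem.Set.empty)
  final.1

-- ===== PRECONDITION & SPEC =====
def Spec_expand_schema_matches (lines : List String) (schema : List (String × List (String × String))) (out : List String) : Prop := out = expand_schema_matches_alt lines schema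
instance (lines : List String) (schema : List (String × List (String × String))) (out : List String) : Decidable (Spec_expand_schema_matches lines schema out) := by unfold Spec_expand_schema_matches; infer_instance

-- ===== CLAIM (what is proved, stated in full; the proofs are below) =====
def Claim_equal_expand_schema_matches : Prop := ∀ (lines : List String) (schema : List (String × List (String × String))), Dom_expand_schema_matches lines schema → Spec_expand_schema_matches lines schema (expand_schema_matches lines schema)

-- ===== LEMMAS AND PROOFS =====

-- the per-line group of strings A feeds into add_line (descriptions of mentioned tables, then the line)
def pvGroup (schema : List (String × List (String × String))) (line : String) : List String :=
  let d := PySem.Dict.ofList schema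
  (d.keys.filter (fun table =>
    PySem.Str.startswith line ("Table " ++ table ++ " ")
    || PySem.Str.isIn (table ++ ".") line
    || PySem.Str.isIn (" " ++ table ++ " ") line)).map
    (fun table => pvDesc table (d.getD table []))
  ++ [line]

-- A's whole loop is pvAddLine folded over the flattened groups
theorem pv_A_eq_fold_groups (lines : List String) (schema : List (String × List (String × String))) :
    ∀ st : List String × PySem.Set String,
      lines.foldl (fun st line =>
        let d := PySem.Dict.ofList schema
        let mentioned := d.keys.filter (fun table =>
          PySem.Str.startswith line ("Table " ++ table ++ " ")
          || PySem.Str.isIn (table ++ ".") line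
          || PySem.Str.isIn (" " ++ table ++ " ") line)
        let st := mentioned.foldl (fun st table => pvAddLine st (pvDesc table (d.getD table []))) st
        pvAddLine st line) st
      = (lines.flatMap (pvGroup schema)).foldl pvAddLine st := by
  induction lines with
  | nil => intro st; simp
  | cons line rest ih =>
      intro st
      simp only [List.foldl_cons, List.flatMap_cons, List.foldl_append, ih]
      congr 1
      simp [pvGroup, List.foldl_append, List.foldl_map]

-- B's table-fold fills bucket i with exactly the matched descriptions for line i, in item order
theorem pv_buckets_eq (lines : List String) :
    ∀ (ts : List (String × List (String × String))) (f : String → List String),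
      ts.foldl (fun buckets p =>
        let desc := pvDesc p.1 p.2
        let p_start := "Table " ++ p.1 ++ " "
        let p_dot := p.1 ++ "."
        let p_word := " " ++ p.1 ++ " "
        List.zipWith (fun bucket line =>
          if pvMatchB line p_start p_dot p_word then bucket ++ [desc] else bucket) buckets lines)
        (lines.map f)
      = lines.map (fun line =>
          f line ++ ((ts.filter (fun p =>
            pvMatchB line ("Table " ++ p.1 ++ " ") (p.1 ++ ".") (" " ++ p.1 ++ " "))).map
            (fun p => pvDesc p.1 p.2))) := by
  intro ts
  induction ts with
  | nil => intro f; simp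
  | cons p rest ih =>
      intro f
      simp only [List.foldl_cons, List.zipWith_map_left, List.zipWith_self]
      rw [show (lines.map fun x =>
            if pvMatchB x ("Table " ++ p.1 ++ " ") (p.1 ++ ".") (" " ++ p.1 ++ " ")
            then f x ++ [pvDesc p.1 p.2] else f x)
          = lines.map (fun x => (fun line =>
            if pvMatchB line ("Table " ++ p.1 ++ " ") (p.1 ++ ".") (" " ++ p.1 ++ " ")
            then f line ++ [pvDesc p.1 p.2] else f line) x) from rfl, ih]
      refine List.map_congr_left (fun line _ => ?_)
      simp only [List.filter_cons]
      by_cases h : pvMatchB line ("Table " ++ p.1 ++ " ") (p.1 ++ ".") (" " ++ p.1 ++ " ")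
      · simp [h]
      · simp [h]

-- one bucket plus its line is A's group for that line
theorem pv_bucket_group (schema : List (String × List (String × String))) (line : String) :
    ((PySem.Dict.ofList schema).items.filter (fun p =>
        pvMatchB line ("Table " ++ p.1 ++ " ") (p.1 ++ ".") (" " ++ p.1 ++ " "))).map
      (fun p => pvDesc p.1 p.2) ++ [line] = pvGroup schema line := by
  simp [pvGroup, pvMatchB,
    PySem.Dict.items_eq_map_keys (PySem.Dict.ofList schema)
      (PySem.Dict.nodup_keys_ofList schema) ([] : List (String × String)),
    List.filter_map, List.map_map, Function.comp_def]

-- zip of a mapped copy of a list with the list itself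
theorem pv_zip_map_self {α β : Type} (l : List α) (f : α → β) :
    (l.map f).zip l = l.map (fun x => (f x, x)) := by
  induction l with
  | nil => rfl
  | cons x xs ih => simp [ih]

-- ===== VERDICT (by name: the statement is the Claim_ definition above) =====
theorem expand_schema_matches_spec : Claim_equal_expand_schema_matches := by
  intro lines schema _
  show expand_schema_matches lines schema = expand_schema_matches_alt lines schema
  simp only [expand_schema_matches, expand_schema_matches_alt]
  rw [pv_A_eq_fold_groups lines schema ([], PySem.Set.empty), pv_buckets_eq lines _ (fun _ => []),
    pv_zip_map_self, List.foldl_map, ← List.foldl_flatMap]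
  rw [show (fun (st : List String × PySem.Set String) (s : String) =>
        if s ≠ "" ∧ ¬ s ∈ st.2 then (st.1 ++ [s], PySem.Set.add st.2 s) else st) = pvAddLine
      from rfl]
  refine congrArg (fun l => (List.foldl pvAddLine ([], PySem.Set.empty) l).1)
    (List.flatMap_congr (fun line _ => ?_))
  simpa using (pv_bucket_group schema line).symm
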